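-- pv_equiv track=rewrite | github.com/subho2107/Codechef | Codechef april long/covid pandemic and long queue.py | isRulemaintained
-- ===== SOURCE A (Python) =====
-- def isRulemaintained(queue):
--     presentFirst = 0
--     for pos in range(len(queue)):
--         if queue[pos] == 1:
--             presentFirst = pos
--             break
--     check = "YES"
--     for pos in range(presentFirst+1, len(queue)):
--         if queue[pos] == 1:
--             if pos - presentFirst >= 6:
--                 presentFirst = pos
--             else:
--                 check = "NO"
--                 break
--
--     return check
-- ===== SOURCE B (Python) =====
-- def isRulemaintained(queue):
--     # Sliding-window occupancy: the rule holds iff no 6 consecutive positions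
--     # ever contain two or more people.
--     window = 0
--     for i, x in enumerate(queue):
--         if x == 1:
--             window += 1
--         if i >= 6 and queue[i - 6] == 1:
--             window -= 1
--         if window >= 2:
--             return "NO"
--     return "YES"
-- ===== Notes on version B (the rewrite author's own statement) =====
-- stated objective: alternative
-- what changed: Replaces A's tracking of the previous occupied index by a sliding-window occupancy count: B maintains the number of people in the last 6 positions and answers NO as soon as any length-6 window contains two, which is equivalent to some consecutive occupied pair having gap < 6.
import Mathlib
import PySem

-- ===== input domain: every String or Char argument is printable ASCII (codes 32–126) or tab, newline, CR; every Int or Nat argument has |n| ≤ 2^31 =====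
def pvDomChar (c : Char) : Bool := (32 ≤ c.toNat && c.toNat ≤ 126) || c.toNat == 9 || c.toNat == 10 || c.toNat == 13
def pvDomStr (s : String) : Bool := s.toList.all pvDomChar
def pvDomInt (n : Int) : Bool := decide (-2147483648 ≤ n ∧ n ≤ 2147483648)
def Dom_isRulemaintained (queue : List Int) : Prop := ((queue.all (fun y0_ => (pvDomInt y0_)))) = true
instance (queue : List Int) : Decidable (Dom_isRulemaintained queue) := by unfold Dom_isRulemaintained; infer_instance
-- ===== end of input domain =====

-- B replaces A's previous-occupied-index tracking by a sliding-window occupancy count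
-- (NO iff some 6 consecutive positions hold two people); objective: alternative algorithm.

-- ===== PORT A =====
-- first loop of A: scan indices from `pos` for the first queue[pos] == 1 (break returns it), else presentFirst stays 0
def isRuleLoop1 (queue : List Int) (pos : Nat) : Int :=
  if pos < queue.length then
    if queue.getD pos 0 = 1 then (pos : Int) else isRuleLoop1 queue (pos + 1)
  else 0
termination_by queue.length - pos

-- second loop of A: indices `pos` upward, state presentFirst; break sets check = "NO"
def isRuleLoop2 (queue : List Int) (pos : Nat) (presentFirst : Int) : String :=
  if pos < queue.length then
    if queue.getD pos 0 = 1 then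
      if (pos : Int) - presentFirst ≥ 6 then isRuleLoop2 queue (pos + 1) (pos : Int)
      else "NO"
    else isRuleLoop2 queue (pos + 1) presentFirst
  else "YES"
termination_by queue.length - pos

def isRulemaintained (queue : List Int) : String :=
  let presentFirst := isRuleLoop1 queue 0
  isRuleLoop2 queue (presentFirst.toNat + 1) presentFirst

-- ===== PORT B =====
-- B's loop over enumerate(queue): sliding count of people in the last 6 positions
def altLoop (queue : List Int) (i : Nat) (window : Int) : String :=
  if i < queue.length then
    let w1 := if queue.getD i 0 = 1 then window + 1 else window
    let w2 := if 6 ≤ i ∧ queue.getD (i - 6) 0 = 1 then w1 - 1 else w1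
    if w2 ≥ 2 then "NO" else altLoop queue (i + 1) w2
  else "YES"
termination_by queue.length - i

def isRulemaintained_alt (queue : List Int) : String := altLoop queue 0 0

-- ===== PRECONDITION & SPEC =====
def Spec_isRulemaintained (queue : List Int) (out : String) : Prop := out = isRulemaintained_alt queue
instance (queue : List Int) (out : String) : Decidable (Spec_isRulemaintained queue out) := by unfold Spec_isRulemaintained; infer_instance

-- ===== CLAIM (what is proved, stated in full; the proofs are below) =====
def Claim_equal_isRulemaintained : Prop := ∀ (queue : List Int), Dom_isRulemaintained queue → Spec_isRulemaintained queue (isRulemaintained queue)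

-- ===== LEMMAS AND PROOFS =====

-- a violation: two people at distance < 6 (Bool, over bounded quantifiers)
def violB (xs : List Int) : Bool :=
  decide (∃ q < xs.length, xs.getD q 0 = 1 ∧ ∃ p < q, q - p < 6 ∧ xs.getD p 0 = 1)

-- a violation among positions below n
def violBelow (xs : List Int) (n : Nat) : Prop :=
  ∃ q < n, q < xs.length ∧ xs.getD q 0 = 1 ∧ ∃ p < q, q - p < 6 ∧ xs.getD p 0 = 1

theorem violB_iff (xs : List Int) : violB xs = true ↔ violBelow xs xs.length := by
  simp only [violB, violBelow, decide_eq_true_eq]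
  exact ⟨fun ⟨q, hq, h1, r⟩ => ⟨q, hq, hq, h1, r⟩, fun ⟨q, hq, _, h1, r⟩ => ⟨q, hq, h1, r⟩⟩

-- two distinct people inside one window of 6 positions below i contradict ¬violBelow i
theorem win_unique (xs : List Int) (i : Nat) (hi : i ≤ xs.length)
    (hnv : ¬ violBelow xs i) (a b : Nat) (ha1 : i - 6 ≤ a) (ha2 : a < i)
    (hb1 : i - 6 ≤ b) (hb2 : b < i)
    (h1 : xs.getD a 0 = 1) (h2 : xs.getD b 0 = 1) (hne : a ≠ b) : False := by
  rcases Nat.lt_or_ge a b with h | h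
  · exact hnv ⟨b, hb2, by omega, h2, a, h, by omega, h1⟩
  · have : b < a := by omega
    exact hnv ⟨a, ha2, by omega, h1, b, this, by omega, h2⟩

-- B's loop invariant: given no violation below i and window = people count in [i-6, i-1],
-- the loop decides whether a violation exists anywhere
theorem altLoop_eq (xs : List Int) : ∀ n i (w : Int), xs.length - i = n →
    ¬ violBelow xs i →
    ((w = 0 ∧ ∀ k, i - 6 ≤ k → k < i → xs.getD k 0 ≠ 1) ∨
     (w = 1 ∧ ∃ k, i - 6 ≤ k ∧ k < i ∧ xs.getD k 0 = 1)) →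
    altLoop xs i w = (if violB xs then "NO" else "YES") := by
  intro n
  induction n with
  | zero =>
    intro i w h hnv _
    have hi : ¬ i < xs.length := by omega
    rw [altLoop]
    simp only [hi, if_false]
    have : violB xs = false := by
      rcases Bool.eq_false_or_eq_true (violB xs) with hv | hv
      · exfalso
        rcases (violB_iff xs).mp hv with ⟨q, hq, hql, h1, r⟩
        exact hnv ⟨q, by omega, hql, h1, r⟩
      · exact hv
    rw [this]; rfl
  | succ n ih =>
    intro i w h hnv hinv
    have hi : i < xs.length := by omega
    rw [altLoop]
    simp only [hi, if_true]
    by_cases hoi : xs.getD i 0 = 1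
    · by_cases hoj : 6 ≤ i ∧ xs.getD (i - 6) 0 = 1
      · -- person enters at i, person leaves at i-6
        rcases hinv with ⟨hw, hwin⟩ | ⟨hw, k, hk1, hk2, hk3⟩
        · exact absurd hoj.2 (hwin (i - 6) (le_refl _) (by omega))
        · -- the window person must be exactly i-6
          have hk : k = i - 6 := by
            by_contra hne
            exact win_unique xs i (by omega) hnv k (i - 6) hk1 hk2 (le_refl _) (by omega) hk3 hoj.2 hne
          subst hw
          simp only [hoi, hoj, and_self, if_true]
          rw [if_neg (by omega : ¬ ((1 : Int) + 1 - 1 ≥ 2))]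
          have hnv' : ¬ violBelow xs (i + 1) := by
            rintro ⟨q, hq, hqlen, hq1, p, hpq, hgap, hp1⟩
            rcases Nat.lt_or_ge q i with hqi | hqi
            · exact hnv ⟨q, hqi, hqlen, hq1, p, hpq, hgap, hp1⟩
            · have hq' : q = i := by omega
              exact win_unique xs i (by omega) hnv p (i - 6) (by omega) (by omega) (le_refl _) (by omega) hp1 hoj.2 (by omega)
          exact ih (i + 1) (1 + 1 - 1) (by omega) hnv'
            (Or.inr ⟨by omega, i, by omega, by omega, hoi⟩)
        -- end hoj true
      · -- person enters at i, nobody leaves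
        rcases hinv with ⟨hw, hwin⟩ | ⟨hw, k, hk1, hk2, hk3⟩
        · subst hw
          simp only [hoi, hoj, if_true, if_false]
          rw [if_neg (by omega : ¬ ((0 : Int) + 1 ≥ 2))]
          have hnv' : ¬ violBelow xs (i + 1) := by
            rintro ⟨q, hq, hqlen, hq1, p, hpq, hgap, hp1⟩
            rcases Nat.lt_or_ge q i with hqi | hqi
            · exact hnv ⟨q, hqi, hqlen, hq1, p, hpq, hgap, hp1⟩
            · have hq' : q = i := by omega
              exact hwin p (by omega) (by omega) hp1
          exact ih (i + 1) (0 + 1) (by omega) hnv'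
            (Or.inr ⟨by omega, i, by omega, by omega, hoi⟩)
        · -- two people in a window of 6: NO, and a violation indeed exists
          subst hw
          simp only [hoi, hoj, if_true, if_false]
          rw [if_pos (by omega : ((1 : Int) + 1 ≥ 2))]
          have hgap : i - k < 6 := by
            rcases Nat.lt_or_ge i 6 with h6 | h6
            · omega
            · have : k ≠ i - 6 := fun hc => hoj ⟨h6, by rwa [← hc]⟩
              omega
          have hv : violB xs = true :=
            (violB_iff xs).mpr ⟨i, hi, hi, hoi, k, hk2, hgap, hk3⟩
          rw [hv]; rfl
    · -- nobody enters at i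
      by_cases hoj : 6 ≤ i ∧ xs.getD (i - 6) 0 = 1
      · rcases hinv with ⟨hw, hwin⟩ | ⟨hw, k, hk1, hk2, hk3⟩
        · exact absurd hoj.2 (hwin (i - 6) (le_refl _) (by omega))
        · have hk : k = i - 6 := by
            by_contra hne
            exact win_unique xs i (by omega) hnv k (i - 6) hk1 hk2 (le_refl _) (by omega) hk3 hoj.2 hne
          subst hw
          simp only [hoi, hoj, and_self, if_true, if_false]
          rw [if_neg (by omega : ¬ ((1 : Int) - 1 ≥ 2))]
          have hnv' : ¬ violBelow xs (i + 1) := by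
            rintro ⟨q, hq, hqlen, hq1, p, hpq, hgap, hp1⟩
            rcases Nat.lt_or_ge q i with hqi | hqi
            · exact hnv ⟨q, hqi, hqlen, hq1, p, hpq, hgap, hp1⟩
            · have hq' : q = i := by omega
              exact hoi (by rwa [hq'] at hq1)
          refine ih (i + 1) (1 - 1) (by omega) hnv' (Or.inl ⟨by omega, ?_⟩)
          intro k' hk'1 hk'2 hk'3
          rcases Nat.lt_or_ge k' i with hki | hki
          · exact win_unique xs i (by omega) hnv k' (i - 6) (by omega) hki (le_refl _) (by omega) hk'3 hoj.2 (by omega)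
          · have : k' = i := by omega
            subst this; exact hoi hk'3
      · rcases hinv with ⟨hw, hwin⟩ | ⟨hw, k, hk1, hk2, hk3⟩
        · subst hw
          simp only [hoi, hoj, if_false]
          rw [if_neg (by omega : ¬ ((0 : Int) ≥ 2))]
          have hnv' : ¬ violBelow xs (i + 1) := by
            rintro ⟨q, hq, hqlen, hq1, p, hpq, hgap, hp1⟩
            rcases Nat.lt_or_ge q i with hqi | hqi
            · exact hnv ⟨q, hqi, hqlen, hq1, p, hpq, hgap, hp1⟩
            · have hq' : q = i := by omega
              exact hoi (by rwa [hq'] at hq1)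
          refine ih (i + 1) 0 (by omega) hnv' (Or.inl ⟨rfl, ?_⟩)
          intro k' hk'1 hk'2 hk'3
          rcases Nat.lt_or_ge k' i with hki | hki
          · exact hwin k' (by omega) hki hk'3
          · have : k' = i := by omega
            subst this; exact hoi hk'3
        · subst hw
          simp only [hoi, hoj, if_false]
          rw [if_neg (by omega : ¬ ((1 : Int) ≥ 2))]
          have hknew : i + 1 - 6 ≤ k := by
            rcases Nat.lt_or_ge i 6 with h6 | h6
            · omega
            · have : k ≠ i - 6 := fun hc => hoj ⟨h6, by rwa [← hc]⟩
              omega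
          have hnv' : ¬ violBelow xs (i + 1) := by
            rintro ⟨q, hq, hqlen, hq1, p, hpq, hgap, hp1⟩
            rcases Nat.lt_or_ge q i with hqi | hqi
            · exact hnv ⟨q, hqi, hqlen, hq1, p, hpq, hgap, hp1⟩
            · have hq' : q = i := by omega
              exact hoi (by rwa [hq'] at hq1)
          exact ih (i + 1) 1 (by omega) hnv' (Or.inr ⟨rfl, k, hknew, by omega, hk3⟩)

-- ------- A-side: reduce A to the chain of occupied positions -------

-- positions of value 1 in xs, indexed starting at j
def posFromL (xs : List Int) (j : Nat) : List Int :=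
  match xs with
  | [] => []
  | x :: xs' => (if x = 1 then [(j : Int)] else []) ++ posFromL xs' (j + 1)

-- gap chain check: all of l at gap ≥ 6 from the previous element, starting from pf
def chainOK (pf : Int) (l : List Int) : Bool :=
  match l with
  | [] => true
  | q :: l' => decide (q - pf ≥ 6) && chainOK q l'

theorem posFromL_drop_succ (xs : List Int) (j : Nat) (h : j < xs.length) :
    posFromL (xs.drop j) j = (if xs.getD j 0 = 1 then [(j : Int)] else []) ++ posFromL (xs.drop (j + 1)) (j + 1) := by
  rw [List.drop_eq_getElem_cons h]
  simp [posFromL, List.getD_eq_getElem?_getD, List.getElem?_eq_getElem h]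

theorem loop2_eq (xs : List Int) : ∀ n j pf, xs.length - j = n →
    isRuleLoop2 xs j pf = (if chainOK pf (posFromL (xs.drop j) j) then "YES" else "NO") := by
  intro n
  induction n with
  | zero =>
    intro j pf h
    have hj : ¬ j < xs.length := by omega
    rw [isRuleLoop2]
    simp [hj, List.drop_eq_nil_of_le (by omega : xs.length ≤ j), posFromL, chainOK]
  | succ n ih =>
    intro j pf h
    have hj : j < xs.length := by omega
    rw [isRuleLoop2, posFromL_drop_succ xs j hj]
    simp only [hj, if_true]
    by_cases h1 : xs.getD j 0 = 1
    · simp only [h1, if_true]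
      by_cases hg : (j : Int) - pf ≥ 6
      · simp only [hg, if_true]
        rw [ih (j + 1) (j : Int) (by omega)]
        simp [chainOK, hg]
      · simp only [hg, if_false]
        simp [chainOK, hg]
    · simp only [h1, if_false]
      rw [ih (j + 1) pf (by omega)]
      simp

theorem loop1_none (xs : List Int) : ∀ n j, xs.length - j = n →
    posFromL (xs.drop j) j = [] → isRuleLoop1 xs j = 0 := by
  intro n
  induction n with
  | zero =>
    intro j h _
    rw [isRuleLoop1]; simp [show ¬ j < xs.length by omega]
  | succ n ih =>
    intro j h hp
    have hj : j < xs.length := by omega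
    rw [posFromL_drop_succ xs j hj] at hp
    rw [isRuleLoop1]
    rcases List.append_eq_nil_iff.mp hp with ⟨h1, h2⟩
    have h1' : ¬ xs.getD j 0 = 1 := by intro hc; rw [hc] at h1; simp at h1
    simp only [hj, if_true, h1', if_false]
    exact ih (j + 1) (by omega) h2

theorem loop1_first (xs : List Int) : ∀ n j q rest, xs.length - j = n →
    posFromL (xs.drop j) j = q :: rest →
    isRuleLoop1 xs j = q ∧ posFromL (xs.drop (q.toNat + 1)) (q.toNat + 1) = rest := by
  intro n
  induction n with
  | zero =>
    intro j q rest h hp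
    rw [List.drop_eq_nil_of_le (by omega : xs.length ≤ j)] at hp
    simp [posFromL] at hp
  | succ n ih =>
    intro j q rest h hp
    have hj : j < xs.length := by omega
    rw [posFromL_drop_succ xs j hj] at hp
    rw [isRuleLoop1]
    by_cases h1 : xs.getD j 0 = 1
    · simp only [h1, if_true, List.singleton_append, List.cons.injEq] at hp
      rcases hp with ⟨hq, hrest⟩
      subst hq
      have h1g : xs[j] = 1 := by
        rwa [List.getD_eq_getElem?_getD, List.getElem?_eq_getElem hj, Option.getD_some] at h1
      refine ⟨by simp [hj, h1g], ?_⟩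
      simpa using hrest
    · simp only [h1, if_false, List.nil_append] at hp
      simp only [hj, if_true, h1, if_false]
      exact ih (j + 1) q rest (by omega) hp

theorem posFromL_tail (xs : List Int) (h : posFromL xs 0 = []) :
    posFromL (xs.drop 1) 1 = [] := by
  cases xs with
  | nil => simp [posFromL]
  | cons x xs' =>
    simp only [posFromL] at h
    rcases List.append_eq_nil_iff.mp h with ⟨_, h2⟩
    simpa [List.drop] using h2

-- membership characterisation of posFromL
theorem posFromL_mem (xs : List Int) : ∀ (j : Nat) (m : Int),
    m ∈ posFromL xs j ↔ ∃ k : Nat, m = (j : Int) + k ∧ k < xs.length ∧ xs.getD k 0 = 1 := by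
  induction xs with
  | nil => intro j m; simp [posFromL]
  | cons x xs' ih =>
    intro j m
    simp only [posFromL, List.mem_append]
    constructor
    · rintro (hm | hm)
      · by_cases hx : x = 1
        · simp [hx] at hm
          exact ⟨0, by omega, by simp, by simpa [hm] using hx⟩
        · simp [hx] at hm
      · rcases (ih (j + 1) m).mp hm with ⟨k, hk1, hk2, hk3⟩
        exact ⟨k + 1, by push_cast at hk1 ⊢; omega, by simpa using hk2, by simpa using hk3⟩
    · rintro ⟨k, hk1, hk2, hk3⟩
      cases k with
      | zero =>
        left
        have hx : x = 1 := by simpa using hk3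
        simp [hx]; omega
      | succ k' =>
        right
        exact (ih (j + 1) m).mpr ⟨k', by push_cast at hk1 ⊢; omega, by simpa using hk2, by simpa using hk3⟩

theorem posFromL_lb (xs : List Int) (j : Nat) (m : Int) (h : m ∈ posFromL xs j) : (j : Int) ≤ m := by
  rcases (posFromL_mem xs j m).mp h with ⟨k, hk1, _, _⟩
  omega

theorem posFromL_pairwise (xs : List Int) : ∀ (j : Nat),
    List.Pairwise (fun a b : Int => a < b) (posFromL xs j) := by
  induction xs with
  | nil => intro j; simp [posFromL]
  | cons x xs' ih =>
    intro j
    simp only [posFromL]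
    rw [List.pairwise_append]
    refine ⟨?_, ih (j + 1), ?_⟩
    · by_cases hx : x = 1 <;> simp [hx]
    · intro a ha b hb
      have hb' := posFromL_lb xs' (j + 1) b hb
      by_cases hx : x = 1
      · simp [hx] at ha; subst ha; push_cast at hb'; omega
      · simp [hx] at ha

theorem chainOK_pairwise : ∀ (l : List Int) (pf : Int), chainOK pf l = true →
    List.Pairwise (fun a b : Int => b - a ≥ 6) (pf :: l) := by
  intro l
  induction l with
  | nil => intro pf _; simp
  | cons q l' ih =>
    intro pf hc
    simp only [chainOK, Bool.and_eq_true, decide_eq_true_eq] at hc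
    have hpw := ih q hc.2
    rw [List.pairwise_cons]
    refine ⟨?_, hpw⟩
    intro b hb
    rcases List.mem_cons.mp hb with hb | hb
    · subst hb; exact hc.1
    · have := (List.pairwise_cons.mp hpw).1 b hb
      omega

-- chain holds → no violation
theorem chain_no_viol (xs : List Int) (q0 : Int) (rest : List Int)
    (hp : posFromL xs 0 = q0 :: rest) (hc : chainOK q0 rest = true) : violB xs = false := by
  rcases Bool.eq_false_or_eq_true (violB xs) with hv | hv
  swap
  · exact hv
  exfalso
  rcases (violB_iff xs).mp hv with ⟨q, hq, _, hq1, p, hpq, hgap, hp1⟩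
  have hmq : (q : Int) ∈ posFromL xs 0 := (posFromL_mem xs 0 q).mpr ⟨q, by omega, hq, hq1⟩
  have hmp : (p : Int) ∈ posFromL xs 0 := (posFromL_mem xs 0 p).mpr ⟨p, by omega, by omega, hp1⟩
  have hpw : List.Pairwise (fun a b : Int => b - a ≥ 6) (q0 :: rest) :=
    chainOK_pairwise rest q0 hc
  have hpw' : List.Pairwise (fun a b : Int => b - a ≥ 6 ∨ a - b ≥ 6) (q0 :: rest) :=
    hpw.imp (fun h => Or.inl h)
  have hsym : Symmetric (fun a b : Int => b - a ≥ 6 ∨ a - b ≥ 6) := fun a b h => h.symm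
  rw [hp] at hmq hmp
  have hne : (p : Int) ≠ (q : Int) := by intro h; omega
  have := hpw'.forall hsym hmp hmq hne
  omega

-- chain fails → a violation exists
theorem chain_viol (xs : List Int) : ∀ (l : List Int) (pf : Int),
    (∀ m ∈ pf :: l, ∃ k : Nat, m = (k : Int) ∧ k < xs.length ∧ xs.getD k 0 = 1) →
    List.Pairwise (fun a b : Int => a < b) (pf :: l) →
    chainOK pf l = false → violB xs = true := by
  intro l
  induction l with
  | nil => intro pf _ _ hc; simp [chainOK] at hc
  | cons q l' ih =>
    intro pf hmem hpw hc
    simp only [chainOK, Bool.and_eq_false_iff] at hc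
    rcases hc with hc | hc
    · have hgap : ¬ ((q - pf : Int) ≥ 6) := by simpa using hc
      rcases hmem pf (by simp) with ⟨kp, hkp1, hkp2, hkp3⟩
      rcases hmem q (by simp) with ⟨kq, hkq1, hkq2, hkq3⟩
      have hlt : pf < q := (List.pairwise_cons.mp hpw).1 q (by simp)
      refine (violB_iff xs).mpr ⟨kq, hkq2, hkq2, hkq3, kp, by omega, by omega, hkp3⟩
    · exact ih q (fun m hm => hmem m (List.mem_cons_of_mem _ hm)) (List.pairwise_cons.mp hpw).2 hc

-- A equals the chain verdict on occupied positions
theorem A_eq (xs : List Int) : isRulemaintained xs =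
    (match posFromL xs 0 with
     | [] => "YES"
     | q :: rest => if chainOK q rest then "YES" else "NO") := by
  simp only [isRulemaintained]
  cases hp : posFromL xs 0 with
  | nil =>
    have h1 : isRuleLoop1 xs 0 = 0 := loop1_none xs (xs.length - 0) 0 rfl (by simpa using hp)
    rw [h1]
    simp only [Int.toNat_zero]
    rw [loop2_eq xs (xs.length - 1) 1 0 rfl, posFromL_tail xs hp]
    simp [chainOK]
  | cons q rest =>
    obtain ⟨h1, h2⟩ := loop1_first xs (xs.length - 0) 0 q rest rfl (by simpa using hp)
    rw [h1, loop2_eq xs (xs.length - (q.toNat + 1)) (q.toNat + 1) q rfl, h2]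

-- ===== VERDICT (by name: the statement is the Claim_ definition above) =====
theorem isRulemaintained_spec : Claim_equal_isRulemaintained := by
  intro xs _
  have hB : isRulemaintained_alt xs = (if violB xs then "NO" else "YES") := by
    simp only [isRulemaintained_alt]
    refine altLoop_eq xs (xs.length - 0) 0 0 rfl ?_ (Or.inl ⟨rfl, ?_⟩)
    · rintro ⟨q, hq, _⟩; omega
    · intro k h1 h2; omega
  simp only [Spec_isRulemaintained, hB, A_eq]
  cases hp : posFromL xs 0 with
  | nil =>
    have hv : violB xs = false := by
      rcases Bool.eq_false_or_eq_true (violB xs) with h | h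
      swap
      · exact h
      exfalso
      rcases (violB_iff xs).mp h with ⟨q, hq, _, hq1, _⟩
      have : (q : Int) ∈ posFromL xs 0 := (posFromL_mem xs 0 q).mpr ⟨q, by omega, hq, hq1⟩
      rw [hp] at this; simp at this
    show "YES" = (if violB xs = true then "NO" else "YES")
    rw [hv]; rfl
  | cons q rest =>
    show (if chainOK q rest = true then "YES" else "NO") = (if violB xs = true then "NO" else "YES")
    rcases Bool.eq_false_or_eq_true (chainOK q rest) with hc | hc
    · have hv : violB xs = false := chain_no_viol xs q rest hp hc
      rw [hc, hv]; rfl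
    · have hv : violB xs = true := by
        refine chain_viol xs rest q ?_ ?_ hc
        · intro m hm
          rw [← hp] at hm
          rcases (posFromL_mem xs 0 m).mp hm with ⟨k, hk1, hk2, hk3⟩
          exact ⟨k, by omega, hk2, hk3⟩
        · rw [← hp]; exact posFromL_pairwise xs 0
      rw [hc, hv]; rfl
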